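-- pv_equiv track=rewrite | github.com/nainaaa1105/ml-Mini-Project | .ipynb_checkpoints/app-checkpoint.py | detect_requested_mood
-- ===== SOURCE A (Python) =====
-- def normalize_text(text: str) -> str:
--     return "".join(ch.lower() if ch.isalnum() else " " for ch in text)
--
-- def detect_requested_mood(text: str, selected_mood: str, rules: dict, fallback_mood: str) -> tuple[str, list[str]]:
--     if selected_mood != "Auto detect":
--         return selected_mood, ["manual selection"]
--
--     words = normalize_text(text).split()
--     scores = {}
--     matched = {}
--     for mood, config in rules.items():
--         keywords = config["keywords"] if isinstance(config, dict) else config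
--         hits = [keyword for keyword in keywords if keyword in words or keyword in normalize_text(text)]
--         if hits:
--             scores[mood] = len(hits)
--             matched[mood] = hits
--
--     if scores:
--         mood = sorted(scores.items(), key=lambda item: (item[1], item[0]), reverse=True)[0][0]
--         return mood, matched[mood]
--
--     return fallback_mood, ["fallback"]
-- ===== SOURCE B (Python) =====
-- def normalize_text(text: str) -> str:
--     return "".join(ch.lower() if ch.isalnum() else " " for ch in text)
--
-- def detect_requested_mood(text: str, selected_mood: str, rules: dict, fallback_mood: str) -> tuple[str, list[str]]:
--     if selected_mood != "Auto detect":
--         return selected_mood, ["manual selection"]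
--
--     norm = normalize_text(text)          # normalized ONCE, not once per keyword
--     best = None                          # (score, mood, hits) — running maximum
--     for mood, config in rules.items():
--         keywords = config["keywords"] if isinstance(config, dict) else config
--         # A's extra "keyword in words" test is redundant: every word of
--         # norm.split() is a substring of norm, so "k in norm" already covers it.
--         hits = [k for k in keywords if k in norm]
--         if hits and (best is None or (len(hits), mood) > (best[0], best[1])):
--             best = (len(hits), mood, hits)
--
--     if best is None:
--         return fallback_mood, ["fallback"]
--     return best[1], best[2]
-- ===== Notes on version B (the rewrite author's own statement) =====
-- stated objective: alternative
-- what changed: B normalizes the text once instead of re-normalizing it for every keyword, drops the redundant word-list membership test (every word of the split is a substring of the normalized text), and replaces the scores/matched dicts plus a full sort with a single-pass running maximum over (score, mood).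
import Mathlib
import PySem

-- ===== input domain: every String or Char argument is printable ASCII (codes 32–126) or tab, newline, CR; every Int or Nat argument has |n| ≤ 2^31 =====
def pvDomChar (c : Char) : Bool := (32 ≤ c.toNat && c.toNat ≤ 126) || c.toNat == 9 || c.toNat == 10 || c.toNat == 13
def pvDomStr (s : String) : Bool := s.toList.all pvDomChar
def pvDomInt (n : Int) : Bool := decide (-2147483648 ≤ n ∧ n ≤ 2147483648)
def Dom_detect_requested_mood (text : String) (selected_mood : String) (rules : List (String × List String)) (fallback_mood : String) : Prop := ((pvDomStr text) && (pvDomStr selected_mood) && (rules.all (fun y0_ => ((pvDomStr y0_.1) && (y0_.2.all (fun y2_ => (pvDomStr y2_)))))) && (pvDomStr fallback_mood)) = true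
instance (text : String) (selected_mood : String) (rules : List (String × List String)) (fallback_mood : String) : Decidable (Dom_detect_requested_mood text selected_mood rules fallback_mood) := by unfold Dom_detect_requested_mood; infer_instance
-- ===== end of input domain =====

-- B normalizes the text once and keeps a running (score, mood) maximum in one pass,
-- instead of A's per-keyword re-normalization and dict-building plus full sort.

-- shared module helper: normalize_text (both A and B call it); exact on the ASCII domain
def normalize_chars (text : String) : List Char :=
  text.toList.map (fun ch => if PySem.Chars.isalnum ch then PySem.Chars.lowerChar ch else ' ')

-- ===== PORT A =====
-- hits = [keyword for keyword in keywords if keyword in words or keyword in normalize_text(text)]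
-- (normalize_text(text) recomputed inside the loop, as in the Python)
def hitsA (text : String) (keywords : List String) : List String :=
  keywords.filter (fun k =>
    (PySem.Chars.split₀ (normalize_chars text)).contains k.toList
      || PySem.Chars.isIn k.toList (normalize_chars text))

-- the loop body over rules.items(): conditional insert into scores and matched
-- (under the typed signature config is always the keyword list, so the isinstance branch is 'keywords = config')
def stepA (text : String)
    (sm : PySem.Dict String Int × PySem.Dict String (List String))
    (it : String × List String) :
    PySem.Dict String Int × PySem.Dict String (List String) :=
  let hits := hitsA text it.2
  if !hits.isEmpty then (sm.1.insert it.1 (hits.length : Int), sm.2.insert it.1 hits)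
  else sm

def detect_requested_mood (text : String) (selected_mood : String) (rules : List (String × List String)) (fallback_mood : String) : String × List String :=
  if selected_mood ≠ "Auto detect" then (selected_mood, ["manual selection"])
  else
    -- rules is the dict parameter: the assoc list read as a Python dict (last value wins, first position)
    let sm := (PySem.Dict.ofList rules).items.foldl (stepA text) (PySem.Dict.empty, PySem.Dict.empty)
    if !sm.1.items.isEmpty then
      -- sorted(scores.items(), key=lambda item: (item[1], item[0]), reverse=True)[0][0];
      -- [0] via headD: scores is nonempty here, so the default is unreachable (no IndexError)
      let mood := ((PySem.List.sorted2 sm.1.items (fun it => it.2) (fun it => it.1) true).headD ("", 0)).1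
      -- matched[mood]: the key is always present here, so getD's default is unreachable (no KeyError)
      (mood, (sm.2.get? mood).getD [])
    else (fallback_mood, ["fallback"])

-- ===== PORT B =====
-- hits = [k for k in keywords if k in norm]  (norm bound once outside the loop; the word-list
-- membership test of A is redundant: every word of norm.split() is a substring of norm)
def hitsB (norm : List Char) (keywords : List String) : List String :=
  keywords.filter (fun k => PySem.Chars.isIn k.toList norm)

-- running maximum: best = (score, mood, hits), replaced when (len(hits), mood) > (best[0], best[1])
def stepB (norm : List Char)
    (best : Option (Int × String × List String)) (it : String × List String) :
    Option (Int × String × List String) :=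
  let hits := hitsB norm it.2
  if hits.isEmpty then best
  else
    match best with
    | none => some ((hits.length : Int), it.1, hits)
    | some (s, m, h) =>
      if (hits.length : Int) > s ∨ ((hits.length : Int) = s ∧ m < it.1) then
        some ((hits.length : Int), it.1, hits)
      else some (s, m, h)

def detect_requested_mood_alt (text : String) (selected_mood : String) (rules : List (String × List String)) (fallback_mood : String) : String × List String :=
  if selected_mood ≠ "Auto detect" then (selected_mood, ["manual selection"])
  else
    let norm := normalize_chars text
    let best := (PySem.Dict.ofList rules).items.foldl (stepB norm) none
    match best with
    | some (_, m, h) => (m, h)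
    | none => (fallback_mood, ["fallback"])

-- ===== PRECONDITION & SPEC =====
def Spec_detect_requested_mood (text : String) (selected_mood : String) (rules : List (String × List String)) (fallback_mood : String) (out : String × List String) : Prop := out = detect_requested_mood_alt text selected_mood rules fallback_mood
instance (text : String) (selected_mood : String) (rules : List (String × List String)) (fallback_mood : String) (out : String × List String) : Decidable (Spec_detect_requested_mood text selected_mood rules fallback_mood out) := by unfold Spec_detect_requested_mood; infer_instance

-- ===== CLAIM (what is proved, stated in full; the proofs are below) =====
def Claim_equal_detect_requested_mood : Prop := ∀ (text : String) (selected_mood : String) (rules : List (String × List String)) (fallback_mood : String), Dom_detect_requested_mood text selected_mood rules fallback_mood → Spec_detect_requested_mood text selected_mood rules fallback_mood (detect_requested_mood text selected_mood rules fallback_mood)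

-- ===== LEMMAS AND PROOFS =====

-- proof-side abbreviations over A's hit list
def cntA (text : String) (it : String × List String) : Int := ((hitsA text it.2).length : Int)
def tupA (text : String) (it : String × List String) : Int × String × List String :=
  (cntA text it, it.1, hitsA text it.2)
def gpA (text : String) (it : String × List String) : String × Int := (it.1, cntA text it)
def hitP (text : String) (it : String × List String) : Bool := !(hitsA text it.2).isEmpty
-- running argmax step (B's comparison, on rule items)
def selstep (text : String) (c x : String × List String) : String × List String :=
  if cntA text x > cntA text c ∨ (cntA text x = cntA text c ∧ c.1 < x.1) then x else c
-- B's fold step after hits are nonempty (the inner update)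
def gB (text : String) (best : Option (Int × String × List String)) (it : String × List String) :
    Option (Int × String × List String) :=
  match best with
  | none => some (tupA text it)
  | some (s, m, h) =>
    if cntA text it > s ∨ (cntA text it = s ∧ m < it.1) then some (tupA text it) else some (s, m, h)

-- every word produced by split() is an infix of the split string
theorem word_infix : ∀ (s cur : List Char) (acc : List (List Char)) (w : List Char),
    w ∈ PySem.Chars.split₀.go s cur acc → w ∈ acc ∨ w <:+: (cur.reverse ++ s) := by
  intro s
  induction s with
  | nil =>
    intro cur acc w hw
    rw [show PySem.Chars.split₀.go [] cur acc
        = if cur.isEmpty then acc.reverse else (cur.reverse :: acc).reverse from rfl] at hw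
    split_ifs at hw with h
    · exact Or.inl (List.mem_reverse.mp hw)
    · rcases List.mem_cons.mp (List.mem_reverse.mp hw) with h1 | h1
      · exact Or.inr (by simp [h1])
      · exact Or.inl h1
  | cons c rest ih =>
    intro cur acc w hw
    rw [show PySem.Chars.split₀.go (c :: rest) cur acc
        = if PySem.Chars.isspace c then
            (if cur.isEmpty then PySem.Chars.split₀.go rest [] acc
             else PySem.Chars.split₀.go rest [] (cur.reverse :: acc))
          else PySem.Chars.split₀.go rest (c :: cur) acc from rfl] at hw
    split_ifs at hw with h1 h2
    · rcases ih [] acc w hw with h | h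
      · exact Or.inl h
      · exact Or.inr (h.trans ⟨cur.reverse ++ [c], [], by simp⟩)
    · rcases ih [] (cur.reverse :: acc) w hw with h | h
      · rcases List.mem_cons.mp h with h3 | h3
        · exact Or.inr ⟨[], c :: rest, by simp [h3]⟩
        · exact Or.inl h3
      · exact Or.inr (h.trans ⟨cur.reverse ++ [c], [], by simp⟩)
    · rcases ih (c :: cur) acc w hw with h | h
      · exact Or.inl h
      · refine Or.inr ?_
        have he : (c :: cur).reverse ++ rest = cur.reverse ++ c :: rest := by simp
        rw [he] at h
        exact h

-- B's substring-only hit test computes the same hit list as A's word-or-substring test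
theorem hitsB_eq (text : String) (kws : List String) :
    hitsB (normalize_chars text) kws = hitsA text kws := by
  unfold hitsA hitsB
  apply List.filter_congr
  intro k _
  cases hin : PySem.Chars.isIn k.toList (normalize_chars text)
  · have hc : (PySem.Chars.split₀ (normalize_chars text)).contains k.toList = false := by
      by_contra hc
      have hmem : k.toList ∈ PySem.Chars.split₀ (normalize_chars text) := by
        have := Bool.not_eq_false _ |>.mp hc
        exact List.contains_iff_mem.mp this
      rcases word_infix (normalize_chars text) [] [] k.toList hmem with h | h
      · simp at h
      · have : PySem.Chars.isIn k.toList (normalize_chars text) = true :=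
          (PySem.Chars.isIn_iff_infix _ _).mpr (by simpa using h)
        rw [this] at hin
        cases hin
    rw [hc]
    rfl
  · simp [hin]

-- the scores/matched loop appends one (fresh-keyed) entry per rule with hits
theorem itemsA_build (text : String) :
    ∀ (l : List (String × List String)) (d1 : PySem.Dict String Int) (d2 : PySem.Dict String (List String)),
    (∀ p ∈ l, d1.contains p.1 = false) → (∀ p ∈ l, d2.contains p.1 = false) →
    (l.map Prod.fst).Nodup →
    (l.foldl (stepA text) (d1, d2)).1.items
        = d1.items ++ (l.filter (hitP text)).map (gpA text)
    ∧ (l.foldl (stepA text) (d1, d2)).2.items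
        = d2.items ++ (l.filter (hitP text)).map (fun it => (it.1, hitsA text it.2)) := by
  intro l
  induction l with
  | nil => intro d1 d2 _ _ _; simp
  | cons p l ih =>
    intro d1 d2 h1 h2 hn
    have hcons : (p.1 :: l.map Prod.fst).Nodup := by simpa using hn
    have hn' : (l.map Prod.fst).Nodup := (List.nodup_cons.mp hcons).2
    have hp : p.1 ∉ l.map Prod.fst := (List.nodup_cons.mp hcons).1
    by_cases hhit : (hitsA text p.2).isEmpty
    · have hstep : stepA text (d1, d2) p = (d1, d2) := by
        simp [stepA, hhit]
      have := ih d1 d2 (fun q hq => h1 q (List.mem_cons_of_mem _ hq))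
        (fun q hq => h2 q (List.mem_cons_of_mem _ hq)) hn'
      simpa [hstep, hitP, hhit] using this
    · have hstep : stepA text (d1, d2) p
          = (d1.insert p.1 ((hitsA text p.2).length : Int), d2.insert p.1 (hitsA text p.2)) := by
        simp [stepA, hhit]
      have hc1 : ∀ q ∈ l, (d1.insert p.1 ((hitsA text p.2).length : Int)).contains q.1 = false := by
        intro q hq
        rw [PySem.Dict.contains_insert]
        have : q.1 ≠ p.1 := by
          intro he; exact hp (he ▸ List.mem_map_of_mem hq)
        simp [this, h1 q (List.mem_cons_of_mem _ hq)]
      have hc2 : ∀ q ∈ l, (d2.insert p.1 (hitsA text p.2)).contains q.1 = false := by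
        intro q hq
        rw [PySem.Dict.contains_insert]
        have : q.1 ≠ p.1 := by
          intro he; exact hp (he ▸ List.mem_map_of_mem hq)
        simp [this, h2 q (List.mem_cons_of_mem _ hq)]
      have hi1 : (d1.insert p.1 ((hitsA text p.2).length : Int)).items
          = d1.items ++ [(p.1, ((hitsA text p.2).length : Int))] :=
        PySem.Dict.items_insert_of_not_contains d1 _ (h1 p (List.mem_cons_self))
      have hi2 : (d2.insert p.1 (hitsA text p.2)).items
          = d2.items ++ [(p.1, hitsA text p.2)] :=
        PySem.Dict.items_insert_of_not_contains d2 _ (h2 p (List.mem_cons_self))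
      have := ih _ _ hc1 hc2 hn'
      rw [List.foldl_cons, hstep]
      constructor
      · rw [this.1, hi1]; simp [hitP, hhit, gpA, cntA]
      · rw [this.2, hi2]; simp [hitP, hhit]

-- head of the insertion-sort fold is the running maximum under `before`
theorem head?_foldl_insertBy {α : Type} (before : α → α → Bool) :
    ∀ (xs : List α) (b : α) (acc : List α),
    (xs.foldl (fun a x => PySem.List.insertBy before x a) (b :: acc)).head?
      = some (xs.foldl (fun cur x => if before x cur then x else cur) b) := by
  intro xs
  induction xs with
  | nil => intro b acc; simp
  | cons x xs ih =>
    intro b acc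
    rw [List.foldl_cons, List.foldl_cons]
    have hins : PySem.List.insertBy before x (b :: acc)
        = if before x b then x :: b :: acc else b :: PySem.List.insertBy before x acc := by
      simp [PySem.List.insertBy]
    rw [hins]
    cases hb : before x b
    · rw [if_neg (by simp), if_neg (by simp)]
      exact ih b (PySem.List.insertBy before x acc)
    · rw [if_pos rfl, if_pos rfl]
      exact ih x (b :: acc)

-- A's two-key comparison bool equals B's tuple comparison
theorem boolcond_eq (a b : Int) (s t : String) :
    (decide (a < b) || (!decide (b < a) && decide (s < t))) = decide (b > a ∨ (b = a ∧ s < t)) := by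
  rw [Bool.eq_iff_iff]
  simp only [Bool.or_eq_true, Bool.and_eq_true, Bool.not_eq_true', decide_eq_true_eq,
    decide_eq_false_iff_not, gt_iff_lt]
  constructor
  · rintro (h | ⟨h1, h2⟩)
    · exact Or.inl h
    · rcases lt_trichotomy a b with h3 | h3 | h3
      · exact Or.inl h3
      · exact Or.inr ⟨h3.symm, h2⟩
      · exact absurd h3 h1
  · rintro (h | ⟨h1, h2⟩)
    · exact Or.inl h
    · exact Or.inr ⟨by omega, h2⟩

-- the mapped (mood, count) running maximum is gpA of the item-level running argmax
theorem foldgp_eq (text : String) :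
    ∀ (cs : List (String × List String)) (c : String × List String),
    cs.foldl (fun cur y =>
        if (decide (cur.2 < (gpA text y).2)
            || (!decide ((gpA text y).2 < cur.2) && decide (cur.1 < (gpA text y).1)))
        then gpA text y else cur) (gpA text c)
      = gpA text (cs.foldl (selstep text) c) := by
  intro cs
  induction cs with
  | nil => intro c; rfl
  | cons x xs ih =>
    intro c
    rw [List.foldl_cons, List.foldl_cons]
    have hstep : (if (decide ((gpA text c).2 < (gpA text x).2)
          || (!decide ((gpA text x).2 < (gpA text c).2) && decide ((gpA text c).1 < (gpA text x).1)))
        then gpA text x else gpA text c) = gpA text (selstep text c x) := by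
      show (if (decide (cntA text c < cntA text x)
          || (!decide (cntA text x < cntA text c) && decide (c.1 < x.1)))
        then gpA text x else gpA text c) = gpA text (selstep text c x)
      rw [boolcond_eq]
      unfold selstep
      simp only [decide_eq_true_eq]
      split_ifs with h <;> rfl
    rw [hstep]
    exact ih _

-- the sorted2-and-take-head of the scored items is gpA of the running argmax
theorem sorted2_head_eq (text : String) :
    ∀ (cs : List (String × List String)) (c : String × List String),
    (PySem.List.sorted2 ((c :: cs).map (gpA text)) (fun it => it.2) (fun it => it.1) true).head?
      = some (gpA text (cs.foldl (selstep text) c)) := by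
  intro cs c
  have hunf : PySem.List.sorted2 ((c :: cs).map (gpA text)) (fun it => it.2) (fun it => it.1) true
      = (cs.map (gpA text)).foldl
          (fun a x => PySem.List.insertBy
            (fun a b => decide (b.2 < a.2) || (!decide (a.2 < b.2) && decide (b.1 < a.1))) x a)
          [gpA text c] := by
    simp only [PySem.List.sorted2, List.map_cons, List.foldl_cons, if_true]
    simp [PySem.List.insertBy]
  rw [hunf, head?_foldl_insertBy, List.foldl_map, foldgp_eq]

-- B's fold over the rules with hits is the running argmax
theorem foldB_eq (text : String) :
    ∀ (cs : List (String × List String)) (c : String × List String),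
    cs.foldl (gB text) (some (tupA text c)) = some (tupA text (cs.foldl (selstep text) c)) := by
  intro cs
  induction cs with
  | nil => intro c; rfl
  | cons x xs ih =>
    intro c
    rw [List.foldl_cons, List.foldl_cons]
    have : gB text (some (tupA text c)) x = some (tupA text (selstep text c x)) := by
      show (if cntA text x > cntA text c ∨ (cntA text x = cntA text c ∧ c.1 < x.1)
          then some (tupA text x) else some (tupA text c)) = some (tupA text (selstep text c x))
      unfold selstep
      split_ifs with h <;> rfl
    rw [this]
    exact ih _

-- the running argmax is one of the candidates
theorem selstep_mem (text : String) :
    ∀ (cs : List (String × List String)) (c : String × List String),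
    cs.foldl (selstep text) c ∈ c :: cs := by
  intro cs
  induction cs with
  | nil => intro c; simp
  | cons x xs ih =>
    intro c
    rw [List.foldl_cons]
    have hxc : selstep text c x = x ∨ selstep text c x = c := by
      unfold selstep; split_ifs <;> simp
    rcases List.mem_cons.mp (ih (selstep text c x)) with h | h
    · rw [h]; rcases hxc with h2 | h2 <;> simp [h2]
    · exact List.mem_cons_of_mem _ (List.mem_cons_of_mem _ h)

-- B's whole fold, rewritten over the filtered candidate list
theorem stepB_foldl_eq (text : String) (l : List (String × List String)) :
    l.foldl (stepB (normalize_chars text)) none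
      = (l.filter (hitP text)).foldl (gB text) none := by
  rw [List.foldl_filter]
  apply PySem.List.foldl_congr_mem
  intro acc x _
  simp only [stepB, hitsB_eq, hitP, gB, tupA, cntA]
  by_cases h : (hitsA text x.2).isEmpty
  · simp [h]
  · simp [h]

-- ===== VERDICT (by name: the statement is the Claim_ definition above) =====
theorem detect_requested_mood_spec : Claim_equal_detect_requested_mood := by
  intro text selected_mood rules fallback_mood _dom
  unfold Spec_detect_requested_mood detect_requested_mood detect_requested_mood_alt
  by_cases hsel : selected_mood ≠ "Auto detect"
  · simp [hsel]
  · simp only [hsel, if_false]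
    have hkeys : (((PySem.Dict.ofList rules).items).map Prod.fst).Nodup :=
      PySem.Dict.nodup_keys_ofList rules
    have hbuild := itemsA_build text (PySem.Dict.ofList rules).items
      PySem.Dict.empty PySem.Dict.empty
      (fun p _ => PySem.Dict.contains_empty p.1) (fun p _ => PySem.Dict.contains_empty p.1) hkeys
    have hB := stepB_foldl_eq text (PySem.Dict.ofList rules).items
    set items := (PySem.Dict.ofList rules).items with hitems
    set cand := items.filter (hitP text) with hcand
    have hsc : (items.foldl (stepA text) (PySem.Dict.empty, PySem.Dict.empty)).1.items
        = cand.map (gpA text) := by simpa using hbuild.1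
    have hmt : (items.foldl (stepA text) (PySem.Dict.empty, PySem.Dict.empty)).2.items
        = cand.map (fun it => (it.1, hitsA text it.2)) := by simpa using hbuild.2
    cases hc : cand with
    | nil =>
      rw [hc] at hsc
      rw [hc] at hB
      simp [hsc, hB]
    | cons c cs =>
      rw [hc] at hsc hB
      have hfold := foldB_eq text cs c
      have hne : ¬ ((items.foldl (stepA text) (PySem.Dict.empty, PySem.Dict.empty)).1.items).isEmpty := by
        simp [hsc]
      have hhead := sorted2_head_eq text cs c
      set e := cs.foldl (selstep text) c with he
      have hmood : ((PySem.List.sorted2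
            ((items.foldl (stepA text) (PySem.Dict.empty, PySem.Dict.empty)).1.items)
            (fun it => it.2) (fun it => it.1) true).head?.getD ("", 0)).1 = e.1 := by
        rw [hsc, hhead]
        rfl
      have hmem : e ∈ cand := by rw [hc]; exact selstep_mem text cs c
      have hget : ((items.foldl (stepA text) (PySem.Dict.empty, PySem.Dict.empty)).2.get? e.1)
          = some (hitsA text e.2) := by
        apply PySem.Dict.get?_of_mem_items
        · rw [hmt]
          exact List.mem_map_of_mem hmem
        · show (((items.foldl (stepA text) (PySem.Dict.empty, PySem.Dict.empty)).2.items).map Prod.fst).Nodup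
          rw [hmt]
          have hsub : (cand.map Prod.fst).Sublist (items.map Prod.fst) :=
            List.Sublist.map Prod.fst List.filter_sublist
          have hnd : (cand.map Prod.fst).Nodup := hkeys.sublist hsub
          simpa [List.map_map, Function.comp] using hnd
      have hBfold : items.foldl (stepB (normalize_chars text)) none
          = some (tupA text e) := by rw [hB, List.foldl_cons]; rw [show gB text none c = some (tupA text c) from rfl]; rw [hfold]
      simp [hne, hBfold, tupA]
      refine ⟨hmood, ?_⟩
      rw [hmood, hget]
      rfl
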